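-- pv_equiv track=rewrite | github.com/dklpp/nasa-challenge | clean_comments.py | remove_css_comments
-- ===== SOURCE A (Python) =====
-- def remove_css_comments(content):
--     """Remove /* */ comments from CSS files."""
--     result = []
--     i = 0
--     while i < len(content):
--         if i < len(content) - 1 and content[i:i+2] == '/*':
--
--             j = i + 2
--             while j < len(content) - 1:
--                 if content[j:j+2] == '*/':
--                     i = j + 2
--                     break
--                 j += 1
--             else:
--
--                 break
--         else:
--             result.append(content[i])
--             i += 1
--
--     return ''.join(result)
-- ===== SOURCE B (Python) =====
-- def remove_css_comments(content):
--     """Remove /* */ comments from CSS files."""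
--     out = []
--     pos = 0
--     while True:
--         start = content.find('/*', pos)
--         if start == -1:
--             out.append(content[pos:])
--             break
--         out.append(content[pos:start])
--         end = content.find('*/', start + 2)
--         if end == -1:
--             break
--         pos = end + 2
--     return ''.join(out)
-- ===== Notes on version B (the rewrite author's own statement) =====
-- stated objective: faster
-- what changed: Replaces A's character-by-character scanner (nested while loops appending single chars) with a jump-based loop using str.find to locate '/*' and '*/' and appending whole slices between comments.
import Mathlib
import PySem

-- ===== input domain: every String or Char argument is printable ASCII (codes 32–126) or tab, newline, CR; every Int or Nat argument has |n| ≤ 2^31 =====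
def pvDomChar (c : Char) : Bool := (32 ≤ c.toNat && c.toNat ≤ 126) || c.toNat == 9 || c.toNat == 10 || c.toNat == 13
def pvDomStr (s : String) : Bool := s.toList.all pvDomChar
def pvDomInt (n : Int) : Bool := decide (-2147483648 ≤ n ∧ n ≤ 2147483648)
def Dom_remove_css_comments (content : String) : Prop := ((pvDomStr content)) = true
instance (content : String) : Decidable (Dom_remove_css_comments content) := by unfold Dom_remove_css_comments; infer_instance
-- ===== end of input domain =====

-- B replaces A's character-by-character scanner with a jump loop that locates '/*' and '*/'
-- by substring search and copies whole slices between comments (objective: faster in Python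
-- by a constant factor — C-level find/slicing instead of per-character work).

-- ===== PORT A =====
-- A's inner `while j < len-1: if content[j:j+2]=='*/': i=j+2; break; j+=1; else: break`:
-- the loop state (position j) is carried as the suffix content[j:]; returns the suffix
-- content[j+2:] after a closing '*/' or none when the scan runs off the end.
def pvInnerA : List Char → Option (List Char)
  | a :: b :: rest => if a = '*' ∧ b = '/' then some rest else pvInnerA (b :: rest)
  | _ => none

theorem pvInnerA_length : ∀ (l r : List Char), pvInnerA l = some r → r.length + 2 ≤ l.length := by
  intro l
  induction l with
  | nil => intro r h; simp [pvInnerA] at h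
  | cons a t ih =>
    intro r h
    cases t with
    | nil => simp [pvInnerA] at h
    | cons b t' =>
      rw [pvInnerA] at h
      split at h
      · simp at h; simp [← h]
      · have := ih r h
        simp at this ⊢; omega

-- A's outer `while i < len(content)` loop: position i carried as the suffix content[i:],
-- `result` built by the c :: … branch; the '/*' branch either jumps past the comment
-- (i = j + 2) or, on an unterminated comment, ends the whole loop (returns the result so far).
def pvOuterA (l : List Char) : List Char :=
  match l with
  | '/' :: '*' :: rest =>
    (match h : pvInnerA rest with
    | some rest' => pvOuterA rest'
    | none => [])
  | c :: rest => c :: pvOuterA rest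
  | [] => []
termination_by l.length
decreasing_by
  · have := pvInnerA_length rest rest' h
    simp; omega
  · simp

def remove_css_comments (content : String) : String :=
  String.mk (pvOuterA content.toList)

-- ===== PORT B =====
-- Source B's content.find(c1+c2, pos): the search position is carried as the suffix; the
-- returned index is relative to that suffix (none = Python's -1).
def pvFind2 (c1 c2 : Char) : List Char → Option Nat
  | a :: b :: rest =>
    if a = c1 ∧ b = c2 then some 0
    else (pvFind2 c1 c2 (b :: rest)).map (· + 1)
  | _ => none

theorem pvFind2_length : ∀ (c1 c2 : Char) (l : List Char) (k : Nat),
    pvFind2 c1 c2 l = some k → k + 2 ≤ l.length := by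
  intro c1 c2 l
  induction l with
  | nil => intro k h; simp [pvFind2] at h
  | cons a t ih =>
    intro k h
    cases t with
    | nil => simp [pvFind2] at h
    | cons b t' =>
      rw [pvFind2] at h
      split at h
      · simp at h; simp [← h]
      · simp [Option.map_eq_some_iff] at h
        obtain ⟨k', hk', rfl⟩ := h
        have := ih k' hk'
        simp at this ⊢; omega

-- Source B's main `while True` loop: `pos` carried as the suffix s = content[pos:], `out` is the
-- list of appended string chunks, joined at the end.
def pvLoopB (s : List Char) (out : List (List Char)) : List Char :=
  match hs : pvFind2 '/' '*' s with
  | none => (out ++ [s]).flatten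
  | some start =>
    let out' := out ++ [s.take start]
    match he : pvFind2 '*' '/' ((s.drop start).drop 2) with
    | none => out'.flatten
    | some e => pvLoopB (((s.drop start).drop 2).drop (e + 2)) out'
termination_by s.length
decreasing_by
  have h1 := pvFind2_length '/' '*' s start hs
  have h2 := pvFind2_length '*' '/' ((s.drop start).drop 2) e he
  simp at h1 h2 ⊢
  omega

def remove_css_comments_alt (content : String) : String :=
  String.mk (pvLoopB content.toList [])

-- ===== PRECONDITION & SPEC =====
def Spec_remove_css_comments (content : String) (out : String) : Prop := out = remove_css_comments_alt content
instance (content : String) (out : String) : Decidable (Spec_remove_css_comments content out) := by unfold Spec_remove_css_comments; infer_instance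

-- ===== CLAIM (what is proved, stated in full; the proofs are below) =====
def Claim_equal_remove_css_comments : Prop := ∀ (content : String), Dom_remove_css_comments content → Spec_remove_css_comments content (remove_css_comments content)

-- ===== LEMMAS AND PROOFS =====

theorem pvOuterA_copy (a b : Char) (t : List Char) (h : ¬(a = '/' ∧ b = '*')) :
    pvOuterA (a :: b :: t) = a :: pvOuterA (b :: t) := by
  rw [pvOuterA]
  intro rest h1 h2
  simp at h2
  exact h ⟨h1, h2.1⟩

theorem pvOuterA_one (a : Char) : pvOuterA [a] = [a] := by
  rw [pvOuterA]
  · rw [pvOuterA]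
  · intro rest _ h2
    simp at h2

theorem pvOuterA_comment_none (r : List Char) (h : pvInnerA r = none) :
    pvOuterA ('/' :: '*' :: r) = [] := by
  rw [pvOuterA]
  split <;> simp_all

theorem pvOuterA_comment_some (r r' : List Char) (h : pvInnerA r = some r') :
    pvOuterA ('/' :: '*' :: r) = pvOuterA r' := by
  rw [pvOuterA]
  split <;> simp_all

theorem pvOuterA_of_find_none : ∀ (s : List Char), pvFind2 '/' '*' s = none → pvOuterA s = s := by
  intro s
  induction s with
  | nil => intro _; rw [pvOuterA]
  | cons a t ih =>
    intro h
    cases t with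
    | nil => exact pvOuterA_one a
    | cons b t' =>
      rw [pvFind2] at h
      split at h
      · simp at h
      · rename_i hne
        simp [Option.map_eq_none_iff] at h
        rw [pvOuterA_copy a b t' hne, ih h]

theorem pvFind2_drop : ∀ (c1 c2 : Char) (s : List Char) (k : Nat),
    pvFind2 c1 c2 s = some k → s.drop k = c1 :: c2 :: s.drop (k + 2) := by
  intro c1 c2 s
  induction s with
  | nil => intro k h; simp [pvFind2] at h
  | cons a t ih =>
    intro k h
    cases t with
    | nil => simp [pvFind2] at h
    | cons b t' =>
      rw [pvFind2] at h
      split at h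
      · rename_i he
        simp at h
        simp [← h, he.1, he.2]
      · simp [Option.map_eq_some_iff] at h
        obtain ⟨k', hk', rfl⟩ := h
        simpa using ih k' hk'

theorem pvOuterA_of_find_some : ∀ (s : List Char) (k : Nat),
    pvFind2 '/' '*' s = some k → pvOuterA s = s.take k ++ pvOuterA (s.drop k) := by
  intro s
  induction s with
  | nil => intro k h; simp [pvFind2] at h
  | cons a t ih =>
    intro k h
    cases t with
    | nil => simp [pvFind2] at h
    | cons b t' =>
      rw [pvFind2] at h
      split at h
      · simp at h; simp [← h]
      · rename_i hne
        simp [Option.map_eq_some_iff] at h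
        obtain ⟨k', hk', rfl⟩ := h
        rw [pvOuterA_copy a b t' hne, ih k' hk']
        simp

theorem pvInnerA_eq_find : ∀ (r : List Char),
    pvInnerA r = (pvFind2 '*' '/' r).map (fun e => r.drop (e + 2)) := by
  intro r
  induction r with
  | nil => simp [pvInnerA, pvFind2]
  | cons a t ih =>
    cases t with
    | nil => simp [pvInnerA, pvFind2]
    | cons b t' =>
      rw [pvInnerA, pvFind2]
      split
      · simp
      · rw [ih]
        cases hf : pvFind2 '*' '/' (b :: t') <;> simp

theorem pvLoopB_eq : ∀ (s : List Char) (out : List (List Char)),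
    pvLoopB s out = out.flatten ++ pvOuterA s := by
  intro s out
  fun_induction pvLoopB s out with
  | case1 s out hs =>
    rw [pvOuterA_of_find_none s hs]
    simp
  | case2 s out start hs out' he =>
    rw [pvOuterA_of_find_some s start hs]
    have hdrop := pvFind2_drop '/' '*' s start hs
    rw [hdrop]
    rw [pvOuterA_comment_none]
    · simp [out']
    · rw [pvInnerA_eq_find]
      have : (s.drop start).drop 2 = s.drop (start + 2) := by
        rw [List.drop_drop]
      rw [← this, he]
      rfl
  | case3 s out start hs out' e he ih =>
    rw [ih, pvOuterA_of_find_some s start hs, pvFind2_drop '/' '*' s start hs,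
        pvOuterA_comment_some (s.drop (start + 2)) (((s.drop start).drop 2).drop (e + 2))]
    · simp [out']
    · rw [pvInnerA_eq_find]
      have h2 : (s.drop start).drop 2 = s.drop (start + 2) := by rw [List.drop_drop]
      rw [← h2, he]
      rfl

-- ===== VERDICT (by name: the statement is the Claim_ definition above) =====
theorem remove_css_comments_spec : Claim_equal_remove_css_comments := by
  intro content _
  unfold Spec_remove_css_comments remove_css_comments remove_css_comments_alt
  rw [pvLoopB_eq]
  rfl
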